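-- pv_equiv track=rewrite | github.com/Schmidl-DS-Practice/GalvanizeDSI | dsi_prep_programmies/num_in_word.py | num_in_word
-- ===== SOURCE A (Python) =====
-- def num_in_word(s):
--
--     if s == '':
--         return ''
--     ordered_s = []
--     for ele in s.split():
--         for char in ele:
--             if char.isdigit():
--                 ordered_s.append((char,ele))
--
--     sentence = ''
--     for i in sorted(ordered_s):
--         sentence += i[1] + ' '
--
--     return sentence.strip()
-- ===== SOURCE B (Python) =====
-- def num_in_word(s):
--     buckets = {d: [] for d in '0123456789'}
--     for word in s.split():
--         for ch in word:
--             if ch in buckets: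
--                 buckets[ch].append(word)
--     out = []
--     for d in '0123456789':
--         out.extend(sorted(buckets[d]))
--     return ' '.join(out)
-- ===== Notes on version B (the rewrite author's own statement) =====
-- stated objective: alternative
-- what changed: B replaces A's flat sort of all (digit, word) tuples by a group-by-digit bucketing pass (a dict of ten digit buckets filled in one scan) followed by sorting each bucket's word list and concatenating the buckets in digit order, built with a space-join instead of append-then-strip.
import Mathlib
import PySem

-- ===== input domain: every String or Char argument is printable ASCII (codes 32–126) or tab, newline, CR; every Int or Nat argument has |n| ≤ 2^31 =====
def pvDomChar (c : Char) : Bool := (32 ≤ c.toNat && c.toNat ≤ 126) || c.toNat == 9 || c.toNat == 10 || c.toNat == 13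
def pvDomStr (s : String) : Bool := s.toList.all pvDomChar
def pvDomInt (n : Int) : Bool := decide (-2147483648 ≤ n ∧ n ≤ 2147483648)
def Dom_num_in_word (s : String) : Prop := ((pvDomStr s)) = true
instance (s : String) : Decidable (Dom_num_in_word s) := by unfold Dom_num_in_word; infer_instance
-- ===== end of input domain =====

-- B groups the digit-bearing words into ten digit buckets and sorts each bucket,
-- instead of A's flat sort of all (digit, word) tuples: an alternative decomposition.


-- Sort with Python's list/tuple order: lexicographic on List Char keys
-- (the LinearOrder instances are pinned so that the order lemmas apply verbatim).
def pvSorted {α : Type} (xs : List α) (key : α → List Char) : List α :=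
  @PySem.List.sorted α (List Char) List.instLinearOrder.toLT LinearOrder.toDecidableLT xs key false

-- ===== PORT A =====
-- Python's tuple order on (char, word) is lexicographic — the char first, then the word;
-- it is exactly the lexicographic List order on the cons list (p.1 :: p.2), used as sort key.
def num_in_word (s : String) : String :=
  if s == "" then "" else
    let ordered_s : List (Char × List Char) :=
      (PySem.Chars.split₀ s.toList).foldl (fun acc ele =>
        ele.foldl (fun acc c =>
          if PySem.Chars.isdigit c then acc ++ [(c, ele)] else acc) acc) []
    let sentence : List Char :=
      (pvSorted ordered_s (fun p => p.1 :: p.2)).foldl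
        (fun sent p => sent ++ (p.2 ++ [' '])) []
    String.mk (PySem.Chars.strip sentence)

-- ===== PORT B =====
def pvDigits : List Char := ['0', '1', '2', '3', '4', '5', '6', '7', '8', '9']

def num_in_word_alt (s : String) : String :=
  -- buckets = {d: [] for d in '0123456789'}
  let buckets0 : PySem.Dict Char (List (List Char)) :=
    pvDigits.foldl (fun b d => b.insert d []) PySem.Dict.empty
  -- for word in s.split(): for ch in word: if ch in buckets: buckets[ch].append(word)
  let buckets : PySem.Dict Char (List (List Char)) :=
    (PySem.Chars.split₀ s.toList).foldl (fun b w =>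
      w.foldl (fun b c => if b.contains c then b.modify c [] (· ++ [w]) else b) b) buckets0
  -- out = []; for d in '0123456789': out.extend(sorted(buckets[d]))
  let out : List (List Char) :=
    pvDigits.foldl (fun out d =>
      out ++ pvSorted (buckets.getD d []) (fun x => x)) []
  -- return ' '.join(out)
  String.mk (PySem.Chars.join [' '] out)

-- ===== PRECONDITION & SPEC =====
def Spec_num_in_word (s : String) (out : String) : Prop := out = num_in_word_alt s
instance (s : String) (out : String) : Decidable (Spec_num_in_word s out) := by unfold Spec_num_in_word; infer_instance

-- ===== CLAIM (what is proved, stated in full; the proofs are below) =====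
def Claim_equal_num_in_word : Prop := ∀ (s : String), Dom_num_in_word s → Spec_num_in_word s (num_in_word s)

-- ===== LEMMAS AND PROOFS =====

-- The (digit, word) pair list A builds: one pair per digit occurrence, in word order.
def pvPairs (ws : List (List Char)) : List (Char × List Char) :=
  ws.flatMap (fun w => (w.filter PySem.Chars.isdigit).map (fun c => (c, w)))

-- The word list of B's bucket for digit d: the word once per occurrence of d in it.
def pvBucket (ws : List (List Char)) (d : Char) : List (List Char) :=
  ws.flatMap (fun w => (w.filter (fun c => c == d)).map (fun _ => w))

theorem pv_isdigit_mem_digits (c : Char) : PySem.Chars.isdigit c = true ↔ c ∈ pvDigits := by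
  constructor
  · intro h
    simp only [PySem.Chars.isdigit, Bool.and_eq_true, decide_eq_true_eq] at h
    obtain ⟨h1, h2⟩ := h
    have hl : 48 ≤ c.toNat := h1
    have hr : c.toNat ≤ 57 := h2
    have h1 : c.toNat = 48 ∨ c.toNat = 49 ∨ c.toNat = 50 ∨ c.toNat = 51 ∨ c.toNat = 52 ∨
        c.toNat = 53 ∨ c.toNat = 54 ∨ c.toNat = 55 ∨ c.toNat = 56 ∨ c.toNat = 57 := by omega
    have hof : Char.ofNat c.toNat = c := Char.ofNat_toNat c
    rcases h1 with h|h|h|h|h|h|h|h|h|h <;> rw [← hof, h] <;> decide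
  · intro h; fin_cases h <;> decide

theorem pv_pairsA (ws : List (List Char)) :
    ws.foldl (fun acc ele =>
      ele.foldl (fun acc c =>
        if PySem.Chars.isdigit c then acc ++ [(c, ele)] else acc) acc) [] = pvPairs ws := by
  simp only [PySem.List.foldl_append_if, pvPairs]
  rw [show (fun (acc : List (Char × List Char)) (ele : List Char) =>
        acc ++ (ele.filter PySem.Chars.isdigit).map (fun c => (c, ele)))
      = (fun acc ele => acc ++ (fun ele => (ele.filter PySem.Chars.isdigit).map (fun c => (c, ele))) ele)
      from rfl]
  rw [PySem.List.foldl_append_eq_flatMap]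
  simp

theorem pv_contains0 (c : Char) :
    ((pvDigits.foldl (fun b d => b.insert d [])
        (PySem.Dict.empty : PySem.Dict Char (List (List Char)))).contains c)
      = PySem.Chars.isdigit c := by
  rw [Bool.eq_iff_iff]
  simp only [pvDigits, List.foldl, PySem.Dict.contains_insert, Bool.or_eq_true, beq_iff_eq]
  rw [pv_isdigit_mem_digits]
  simp only [pvDigits, List.mem_cons, List.not_mem_nil, or_false]
  simp [PySem.Dict.contains, PySem.Dict.empty]
  tauto

theorem pv_inner_contains (w : List Char) (cs : List Char)
    (b : PySem.Dict Char (List (List Char)))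
    (hb : ∀ c, b.contains c = PySem.Chars.isdigit c) :
    ∀ c', (cs.foldl (fun b c => if b.contains c then b.modify c [] (· ++ [w]) else b) b).contains c'
      = PySem.Chars.isdigit c' := by
  induction cs generalizing b with
  | nil => exact hb
  | cons c cs ih =>
    simp only [List.foldl_cons]
    by_cases h : PySem.Chars.isdigit c = true
    · have hbc : b.contains c = true := by rw [hb c, h]
      rw [if_pos hbc]
      apply ih
      intro c'
      rw [PySem.Dict.contains_modify, hb c']
      by_cases hc : c' = c
      · subst hc; simp [h]
      · simp [hc]
    · have hbc : b.contains c = false := by rw [hb c]; simpa using h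
      rw [if_neg (by simp [hbc])]
      exact ih b hb

theorem pv_inner_getD (w : List Char) (cs : List Char)
    (b : PySem.Dict Char (List (List Char)))
    (hb : ∀ c, b.contains c = PySem.Chars.isdigit c)
    (d : Char) (hd : PySem.Chars.isdigit d = true) :
    (cs.foldl (fun b c => if b.contains c then b.modify c [] (· ++ [w]) else b) b).getD d []
      = b.getD d [] ++ (cs.filter (fun c => c == d)).map (fun _ => w) := by
  induction cs generalizing b with
  | nil => simp
  | cons c cs ih =>
    simp only [List.foldl_cons, List.filter_cons]
    by_cases h : PySem.Chars.isdigit c = true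
    · have hbc : b.contains c = true := by rw [hb c, h]
      rw [if_pos hbc]
      rw [ih _ (by
        intro c'
        rw [PySem.Dict.contains_modify, hb c']
        by_cases hc : c' = c
        · subst hc; simp [h]
        · simp [hc])]
      by_cases hcd : c = d
      · subst hcd
        rw [PySem.Dict.getD_modify_self]
        simp
      · rw [PySem.Dict.getD_modify_of_ne _ _ _ (fun e => hcd e.symm)]
        have hf : (c == d) = false := by simp [hcd]
        simp [hf]
    · have hbc : b.contains c = false := by rw [hb c]; simpa using h
      rw [if_neg (by simp [hbc])]
      have hcd : (c == d) = false := by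
        apply beq_eq_false_iff_ne.mpr
        intro e; subst e; exact h hd
      simp only [hcd, Bool.false_eq_true, if_false]
      exact ih b hb

theorem pv_outer_getD (ws : List (List Char))
    (b : PySem.Dict Char (List (List Char)))
    (hb : ∀ c, b.contains c = PySem.Chars.isdigit c)
    (d : Char) (hd : PySem.Chars.isdigit d = true) :
    (ws.foldl (fun b w =>
        w.foldl (fun b c => if b.contains c then b.modify c [] (· ++ [w]) else b) b) b).getD d []
      = b.getD d [] ++ ws.flatMap (fun w => (w.filter (fun c => c == d)).map (fun _ => w)) := by
  induction ws generalizing b with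
  | nil => simp
  | cons w ws ih =>
    simp only [List.foldl_cons, List.flatMap_cons]
    rw [ih _ (pv_inner_contains w w b hb)]
    rw [pv_inner_getD w w b hb d hd]
    simp [List.append_assoc]

-- B's bucket dictionary after the word loop.
theorem pv_bucketsB (ws : List (List Char)) (d : Char) (hd : d ∈ pvDigits) :
    ((ws.foldl (fun b w =>
        w.foldl (fun b c => if b.contains c then b.modify c [] (· ++ [w]) else b) b)
      (pvDigits.foldl (fun b d => b.insert d []) PySem.Dict.empty)).getD d [])
    = pvBucket ws d := by
  have hdd : PySem.Chars.isdigit d = true := (pv_isdigit_mem_digits d).mpr hd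
  rw [pv_outer_getD ws _ pv_contains0 d hdd]
  have h0 : (pvDigits.foldl (fun b d => b.insert d [])
      (PySem.Dict.empty : PySem.Dict Char (List (List Char)))).getD d [] = [] := by
    fin_cases hd <;> decide
  rw [h0]
  simp [pvBucket]

-- Partition: concatenating the filters over distinct keys that cover l is a permutation of l.
theorem pv_perm_partition {α : Type} (key : α → Char) (ks : List Char) (l : List α)
    (hnd : ks.Nodup) (hall : ∀ x ∈ l, key x ∈ ks) :
    (ks.flatMap (fun k => l.filter (fun x => key x == k))).Perm l := by
  induction ks generalizing l with
  | nil =>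
    have : l = [] := List.eq_nil_iff_forall_not_mem.mpr (fun x hx => by simpa using hall x hx)
    subst this; simp
  | cons k ks ih =>
    simp only [List.flatMap_cons]
    have hknotin : k ∉ ks := (List.nodup_cons.mp hnd).1
    have hstep : ∀ k' ∈ ks, l.filter (fun x => key x == k')
        = (l.filter (fun x => !(key x == k))).filter (fun x => key x == k') := by
      intro k' hk'
      rw [List.filter_filter]
      apply List.filter_congr
      intro x _
      by_cases h : key x = k'
      · have hk'k : (k' == k) = false := by
          apply beq_eq_false_iff_ne.mpr
          intro e
          exact hknotin (e ▸ hk')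
        simp [h, hk'k]
      · simp [h]
    rw [List.flatMap_congr hstep]
    have hperm := ih (l.filter (fun x => !(key x == k))) (List.nodup_cons.mp hnd).2 (by
      intro x hx
      have hmem := List.mem_of_mem_filter hx
      have hcond := List.of_mem_filter hx
      rcases List.mem_cons.mp (hall x hmem) with h | h
      · exfalso; rw [h] at hcond; simp at hcond
      · exact h)
    exact (List.Perm.append_left _ hperm).trans (List.filter_append_perm _ l)

theorem pv_filter_pairs (ws : List (List Char)) (d : Char) (hd : d ∈ pvDigits) :
    (pvPairs ws).filter (fun p => p.1 == d) = (pvBucket ws d).map (fun w => (d, w)) := by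
  have hdd : PySem.Chars.isdigit d = true := (pv_isdigit_mem_digits d).mpr hd
  unfold pvPairs pvBucket
  rw [List.filter_flatMap, List.map_flatMap]
  apply List.flatMap_congr
  intro w _
  rw [List.filter_map, List.map_map]
  rw [show ((fun (p : Char × List Char) => p.1 == d) ∘ fun c => (c, w)) = (fun c => c == d) from rfl]
  rw [List.filter_filter]
  have h2 : w.filter (fun c => (c == d) && PySem.Chars.isdigit c) = w.filter (fun c => c == d) := by
    apply List.filter_congr
    intro c _
    by_cases h : c = d
    · subst h; simp [hdd]
    · simp [h]
  rw [h2]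
  apply List.map_congr_left
  intro c hc
  have hcd : c = d := by simpa using List.of_mem_filter hc
  simp [hcd]

theorem pvSorted_perm {α : Type} (xs : List α) (key : α → List Char) :
    (pvSorted xs key).Perm xs :=
  @PySem.List.sorted_perm α (List Char) List.instLinearOrder.toLT LinearOrder.toDecidableLT xs key false

theorem pvSorted_pairwise {α : Type} (xs : List α) (key : α → List Char) :
    (pvSorted xs key).Pairwise (fun a b => key a ≤ key b) :=
  PySem.List.sorted_pairwise xs key

-- The heart: A's flat tuple sort equals B's bucket-by-bucket traversal.
theorem pv_main (ws : List (List Char)) :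
    pvSorted (pvPairs ws) (fun p => p.1 :: p.2)
    = pvDigits.flatMap (fun d =>
        (pvSorted (pvBucket ws d) (fun x => x)).map (fun w => (d, w))) := by
  have hinj : Function.Injective (fun p : Char × List Char => p.1 :: p.2) := by
    intro p q h
    simp only [List.cons.injEq] at h
    exact Prod.ext h.1 h.2
  apply PySem.List.eq_of_perm_of_pairwise_le_of_injective _ hinj
  · -- permutation
    have hA : (pvSorted (pvPairs ws) (fun p => p.1 :: p.2)).Perm (pvPairs ws) :=
      pvSorted_perm _ _
    have step1 : (pvDigits.flatMap (fun d =>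
        (pvSorted (pvBucket ws d) (fun x => x)).map (fun w => (d, w)))).Perm
        (pvDigits.flatMap (fun d => (pvBucket ws d).map (fun w => (d, w)))) := by
      apply List.Perm.flatMap_left
      intro d _
      exact (pvSorted_perm _ _).map _
    have hfilters : pvDigits.flatMap (fun d => (pvBucket ws d).map (fun w => (d, w)))
        = pvDigits.flatMap (fun d => (pvPairs ws).filter (fun p => p.1 == d)) :=
      List.flatMap_congr (fun d hd => (pv_filter_pairs ws d hd).symm)
    have hpart : (pvDigits.flatMap (fun d =>
        (pvPairs ws).filter (fun p => p.1 == d))).Perm (pvPairs ws) := by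
      apply pv_perm_partition Prod.fst pvDigits (pvPairs ws) (by decide)
      intro p hp
      rw [← pv_isdigit_mem_digits]
      simp only [pvPairs, List.mem_flatMap, List.mem_map] at hp
      obtain ⟨w, _, c, hc, rfl⟩ := hp
      exact List.of_mem_filter hc
    have hB : (pvDigits.flatMap (fun d => (pvBucket ws d).map (fun w => (d, w)))).Perm
        (pvPairs ws) := by
      rw [hfilters]; exact hpart
    exact hA.trans (step1.trans hB).symm
  · exact pvSorted_pairwise _ _
  · -- pairwise on the bucket concatenation
    rw [List.pairwise_flatMap]
    constructor
    · intro d _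
      rw [List.pairwise_map]
      exact (pvSorted_pairwise (pvBucket ws d) (fun x => x)).imp
        (fun h => List.cons_le_cons d h)
    · have hlt : pvDigits.Pairwise (· < ·) := by decide
      refine hlt.imp ?_
      intro d d' hdd' x hx y hy
      obtain ⟨w, -, rfl⟩ := List.mem_map.mp hx
      obtain ⟨w', -, rfl⟩ := List.mem_map.mp hy
      exact le_of_lt (by rw [List.cons_lt_cons_iff]; exact Or.inl hdd')

-- Every word produced by split₀ is nonempty and whitespace-free.
theorem pv_go_words (rest : List Char) : ∀ (cur : List Char) (acc : List (List Char)),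
    (∀ c ∈ cur, PySem.Chars.isspace c = false) →
    (∀ w ∈ acc, w ≠ [] ∧ ∀ c ∈ w, PySem.Chars.isspace c = false) →
    ∀ w ∈ PySem.Chars.split₀.go rest cur acc, w ≠ [] ∧ ∀ c ∈ w, PySem.Chars.isspace c = false := by
  induction rest with
  | nil =>
    intro cur acc hcur hacc w hw
    rw [show PySem.Chars.split₀.go [] cur acc
        = (if cur.isEmpty = true then acc.reverse else (cur.reverse :: acc).reverse) from rfl] at hw
    by_cases h : cur.isEmpty = true
    · rw [if_pos h] at hw
      exact hacc w (List.mem_reverse.mp hw)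
    · rw [if_neg h] at hw
      rcases List.mem_cons.mp (List.mem_reverse.mp hw) with h1 | h1
      · subst h1
        refine ⟨?_, fun c hc => hcur c (List.mem_reverse.mp hc)⟩
        intro e
        exact h (by simp [List.reverse_eq_nil_iff.mp e])
      · exact hacc w h1
  | cons c rest ih =>
    intro cur acc hcur hacc w hw
    rw [show PySem.Chars.split₀.go (c :: rest) cur acc
        = (if PySem.Chars.isspace c = true then
            (if cur.isEmpty = true then PySem.Chars.split₀.go rest [] acc
              else PySem.Chars.split₀.go rest [] (cur.reverse :: acc))
          else PySem.Chars.split₀.go rest (c :: cur) acc) from rfl] at hw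
    by_cases h1 : PySem.Chars.isspace c = true
    · rw [if_pos h1] at hw
      by_cases h2 : cur.isEmpty = true
      · rw [if_pos h2] at hw
        exact ih [] acc (by simp) hacc w hw
      · rw [if_neg h2] at hw
        refine ih [] (cur.reverse :: acc) (by simp) ?_ w hw
        intro w' hw'
        rcases List.mem_cons.mp hw' with h3 | h3
        · subst h3
          refine ⟨?_, fun c' hc' => hcur c' (List.mem_reverse.mp hc')⟩
          intro e
          exact h2 (by simp [List.reverse_eq_nil_iff.mp e])
        · exact hacc w' h3
    · rw [if_neg h1] at hw
      refine ih (c :: cur) acc ?_ hacc w hw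
      intro c' hc'
      rcases List.mem_cons.mp hc' with h3 | h3
      · subst h3; simpa using h1
      · exact hcur c' h3

theorem pv_split₀_words (cs : List Char) :
    ∀ w ∈ PySem.Chars.split₀ cs, w ≠ [] ∧ ∀ c ∈ w, PySem.Chars.isspace c = false :=
  pv_go_words cs [] [] (by simp) (by simp)

theorem pv_reverse_flatMap {α β : Type} (l : List α) (f : α → List β) :
    (l.flatMap f).reverse = l.reverse.flatMap (fun x => (f x).reverse) := by
  simp [List.flatMap, List.reverse_flatten, List.map_reverse]
  rfl

theorem pv_join_concat (xs : List (List Char)) (wl : List Char) :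
    PySem.Chars.join [' '] (xs ++ [wl]) = xs.flatMap (fun w => w ++ [' ']) ++ wl := by
  induction xs with
  | nil => simp [PySem.Chars.join, List.intercalate]
  | cons x xs ih =>
    rw [show (x :: xs) ++ [wl] = x :: (xs ++ [wl]) from rfl]
    cases hxx : xs ++ [wl] with
    | nil => exact absurd hxx (by simp)
    | cons b t =>
      rw [show PySem.Chars.join [' '] (x :: b :: t)
          = x ++ [' '] ++ PySem.Chars.join [' '] (b :: t) from by
        simp [PySem.Chars.join, List.intercalate, List.intersperse]]
      rw [← hxx, ih]
      simp [List.append_assoc]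

theorem pv_lstrip_id (ws : List (List Char))
    (h : ∀ w ∈ ws, w ≠ [] ∧ ∀ c ∈ w, PySem.Chars.isspace c = false) (hne : ws ≠ []) :
    PySem.Chars.lstrip (ws.flatMap (fun w => w ++ [' '])) = ws.flatMap (fun w => w ++ [' ']) := by
  cases ws with
  | nil => exact absurd rfl hne
  | cons w0 rest =>
    obtain ⟨hne0, hns0⟩ := h w0 (by simp)
    cases w0 with
    | nil => exact absurd rfl hne0
    | cons c0 t0 =>
      have hsp0 : PySem.Chars.isspace c0 = false := hns0 c0 (by simp)
      simp [PySem.Chars.lstrip, hsp0]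

theorem pv_rstrip_concat (front : List (List Char)) (wl : List Char)
    (hne : wl ≠ []) (hns : ∀ c ∈ wl, PySem.Chars.isspace c = false) :
    PySem.Chars.rstrip ((front ++ [wl]).flatMap (fun w => w ++ [' ']))
      = front.flatMap (fun w => w ++ [' ']) ++ wl := by
  unfold PySem.Chars.rstrip
  rw [pv_reverse_flatMap]
  rw [List.reverse_append]
  rw [show ([wl] : List (List Char)).reverse = [wl] from rfl]
  rw [show ([wl] ++ front.reverse).flatMap (fun w => (w ++ [' ']).reverse)
      = (wl ++ [' ']).reverse ++ front.reverse.flatMap (fun w => (w ++ [' ']).reverse) from by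
    simp]
  rw [show (wl ++ [' ']).reverse = ' ' :: wl.reverse from by simp]
  cases hwr : wl.reverse with
  | nil => exact absurd (List.reverse_eq_nil_iff.mp hwr) hne
  | cons cl tl =>
    have hcl : PySem.Chars.isspace cl = false := by
      apply hns
      have : cl ∈ wl.reverse := by rw [hwr]; simp
      exact List.mem_reverse.mp this
    rw [show List.dropWhile PySem.Chars.isspace
          (' ' :: (cl :: tl) ++ front.reverse.flatMap (fun w => (w ++ [' ']).reverse))
        = cl :: tl ++ front.reverse.flatMap (fun w => (w ++ [' ']).reverse) from by
      simp [List.dropWhile, show PySem.Chars.isspace ' ' = true from rfl, hcl]]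
    rw [show (cl :: tl : List Char) ++ front.reverse.flatMap (fun w => (w ++ [' ']).reverse)
        = wl.reverse ++ front.reverse.flatMap (fun w => (w ++ [' ']).reverse) from by rw [hwr]]
    rw [List.reverse_append]
    rw [List.reverse_reverse]
    rw [← pv_reverse_flatMap, List.reverse_reverse]

-- Stripping "w₀ w₁ … wₙ " gives "w₀ w₁ … wₙ" when the words are nonempty and whitespace-free.
theorem pv_strip_join (ws : List (List Char))
    (h : ∀ w ∈ ws, w ≠ [] ∧ ∀ c ∈ w, PySem.Chars.isspace c = false) :
    PySem.Chars.strip (ws.flatMap (fun w => w ++ [' '])) = PySem.Chars.join [' '] ws := by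
  rcases List.eq_nil_or_concat ws with hnil | ⟨front, wl, rfl⟩
  · subst hnil
    simp [PySem.Chars.strip, PySem.Chars.lstrip, PySem.Chars.rstrip, PySem.Chars.join,
      List.intercalate]
  · simp only [List.concat_eq_append] at h ⊢
    unfold PySem.Chars.strip
    rw [pv_lstrip_id _ h (by simp)]
    obtain ⟨hne, hns⟩ := h wl (by simp)
    rw [pv_rstrip_concat front wl hne hns]
    rw [pv_join_concat]

theorem pv_flatMap_map_snd (d : Char) (X : List (List Char)) :
    (X.map (fun w => (d, w))).flatMap (fun p : Char × List Char => p.2 ++ [' '])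
      = X.flatMap (fun w => w ++ [' ']) := by
  induction X with
  | nil => rfl
  | cons x xs ih => simp [ih]

-- ===== VERDICT (by name: the statement is the Claim_ definition above) =====
theorem num_in_word_spec : Claim_equal_num_in_word := by
  unfold Claim_equal_num_in_word
  intro s _
  unfold Spec_num_in_word
  by_cases hs : (s == "") = true
  · have he : s = "" := by simpa using hs
    subst he
    decide
  · have hsf : (s == "") = false := by simpa using hs
    simp only [num_in_word, num_in_word_alt, hsf, Bool.false_eq_true, if_false]
    rw [pv_pairsA (PySem.Chars.split₀ s.toList)]
    rw [pv_main]
    have e3 : (pvDigits.flatMap (fun d =>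
          (pvSorted (pvBucket (PySem.Chars.split₀ s.toList) d) (fun x => x)).map
            (fun w => (d, w)))).foldl (fun sent p => sent ++ (p.2 ++ [' '])) []
        = pvDigits.flatMap (fun d =>
            (pvSorted (pvBucket (PySem.Chars.split₀ s.toList) d) (fun x => x)).flatMap
              (fun w => w ++ [' '])) := by
      rw [PySem.List.foldl_append_eq_flatMap (fun p : Char × List Char => p.2 ++ [' ']),
        List.nil_append, List.flatMap_assoc]
      exact List.flatMap_congr (fun d _ => pv_flatMap_map_snd d _)
    rw [e3]
    have e4 : pvDigits.flatMap (fun d =>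
          (pvSorted (pvBucket (PySem.Chars.split₀ s.toList) d) (fun x => x)).flatMap
            (fun w => w ++ [' ']))
        = (pvDigits.flatMap (fun d =>
            pvSorted (pvBucket (PySem.Chars.split₀ s.toList) d) (fun x => x))).flatMap
            (fun w => w ++ [' ']) :=
      (List.flatMap_assoc).symm
    rw [e4]
    have hwords : ∀ w ∈ pvDigits.flatMap (fun d =>
        pvSorted (pvBucket (PySem.Chars.split₀ s.toList) d) (fun x => x)),
        w ≠ [] ∧ ∀ c ∈ w, PySem.Chars.isspace c = false := by
      intro w hw
      simp only [List.mem_flatMap] at hw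
      obtain ⟨d, -, hw⟩ := hw
      have hmem : w ∈ pvBucket (PySem.Chars.split₀ s.toList) d :=
        (pvSorted_perm _ _).mem_iff.mp hw
      rw [pvBucket, List.mem_flatMap] at hmem
      obtain ⟨w', hw', hmm⟩ := hmem
      obtain ⟨c, -, hww⟩ := List.mem_map.mp hmm
      rw [← hww]
      simpa using pv_split₀_words s.toList w' hw'
    rw [pv_strip_join _ hwords]
    rw [PySem.List.foldl_append_eq_flatMap (fun d => pvSorted
        ((((PySem.Chars.split₀ s.toList).foldl (fun b w =>
            w.foldl (fun b c => if b.contains c then b.modify c [] (· ++ [w]) else b) b)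
          (pvDigits.foldl (fun b d => b.insert d []) PySem.Dict.empty))).getD d [])
        (fun x => x))]
    rw [List.nil_append]
    have hfin : pvDigits.flatMap (fun d => pvSorted
        ((((PySem.Chars.split₀ s.toList).foldl (fun b w =>
            w.foldl (fun b c => if b.contains c then b.modify c [] (· ++ [w]) else b) b)
          (pvDigits.foldl (fun b d => b.insert d []) PySem.Dict.empty))).getD d []) (fun x => x))
        = pvDigits.flatMap (fun d =>
            pvSorted (pvBucket (PySem.Chars.split₀ s.toList) d) (fun x => x)) :=
      List.flatMap_congr (fun d hd => by rw [pv_bucketsB (PySem.Chars.split₀ s.toList) d hd])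
    rw [hfin]
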